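-- pv_equiv track=rewrite | github.com/alexrudnick/NaNoGenMo | src/find_names.py | set_of_named_entities
-- ===== SOURCE A (Python) =====
-- def set_of_named_entities(tagged_sentences):
--     """ """
--     out = set()
--     entities = []
--     for ts in tagged_sentences:
--         entity = ()
--         entity_tag = None
--         for tok,tag in ts:
--             if tag != entity_tag:
--                 if entity_tag:
--                     entities.append((entity_tag, entity))
--                 entity = ()
--                 entity_tag = None
--             if tag != 'O':
--                 entity = entity + (tok,)
--                 entity_tag = tag
--             else:
--                 entity = []
--                 entity_tag = None
--         if entity_tag:
--             entities.append((entity_tag, entity))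
--     return set(entities)
-- ===== SOURCE B (Python) =====
-- def set_of_named_entities(tagged_sentences):
--     """Two-pointer scan: for each run start i, advance j to the run's end and emit the slice."""
--     out = set()
--     for ts in tagged_sentences:
--         i = 0
--         n = len(ts)
--         while i < n:
--             tag = ts[i][1]
--             j = i + 1
--             while j < n and ts[j][1] == tag:
--                 j += 1
--             if tag and tag != 'O':
--                 out.add((tag, tuple(tok for tok, _ in ts[i:j])))
--             i = j
--     return out
-- ===== Notes on version B (the rewrite author's own statement) =====
-- stated objective: alternative
-- what changed: B replaces A's token-by-token accumulator state machine by an index-based two-pointer scan: for each run start i it advances a second pointer j to the end of the equal-tag run, emits the slice ts[i:j] in one step when the tag is truthy and not 'O', and jumps i to j, never maintaining a partial-entity accumulator.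
import Mathlib
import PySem

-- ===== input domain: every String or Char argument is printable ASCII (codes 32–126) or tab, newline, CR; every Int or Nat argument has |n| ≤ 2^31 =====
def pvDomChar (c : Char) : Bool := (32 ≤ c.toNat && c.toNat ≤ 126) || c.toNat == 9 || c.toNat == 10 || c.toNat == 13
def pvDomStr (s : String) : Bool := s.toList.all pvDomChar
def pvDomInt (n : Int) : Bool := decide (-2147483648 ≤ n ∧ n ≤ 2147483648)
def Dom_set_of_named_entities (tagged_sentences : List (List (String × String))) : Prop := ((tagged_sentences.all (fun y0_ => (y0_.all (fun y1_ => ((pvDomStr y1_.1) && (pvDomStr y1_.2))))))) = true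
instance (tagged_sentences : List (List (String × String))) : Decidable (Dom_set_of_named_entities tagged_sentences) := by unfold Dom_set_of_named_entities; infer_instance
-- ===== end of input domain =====

-- B replaces A's token-by-token accumulator state machine by a two-pointer scan: for each run
-- start i it advances j to the run's end and emits the slice ts[i:j] directly; same cost (alternative).

-- ===== PORT A =====
-- A's per-token step: state = (entities, entity, entity_tag); `if entity_tag:` is Python truthiness
-- (None and '' are falsy), `tag != entity_tag` compares a str with Optional[str].
def pvStepTok (st : List (String × List String) × List String × Option String)
    (p : String × String) : List (String × List String) × List String × Option String :=
  let st1 :=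
    if st.2.2 ≠ some p.2 then
      ((match st.2.2 with
        | some t => if t ≠ "" then st.1 ++ [(t, st.2.1)] else st.1
        | none => st.1), ([] : List String), (none : Option String))
    else st
  if p.2 ≠ "O" then (st1.1, st1.2.1 ++ [p.1], some p.2) else (st1.1, [], none)

-- A's outer loop body: fold the tokens, then the end-of-sentence `if entity_tag:` flush.
def pvSentA (entities : List (String × List String)) (ts : List (String × String)) :
    List (String × List String) :=
  let st := ts.foldl pvStepTok (entities, ([] : List String), (none : Option String))
  match st.2.2 with
  | some t => if t ≠ "" then st.1 ++ [(t, st.2.1)] else st.1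
  | none => st.1

def set_of_named_entities (tagged_sentences : List (List (String × String))) :
    List (String × List String) :=
  PySem.Set.ofList (tagged_sentences.foldl pvSentA [])

-- ===== PORT B =====
-- B's inner while loop: advance j while j < n and ts[j][1] == tag.
def pvRunEnd (ts : List (String × String)) (tag : String) (j : Nat) : Nat :=
  if h : j < ts.length then
    if (ts.get ⟨j, h⟩).2 = tag then pvRunEnd ts tag (j + 1) else j
  else j
termination_by ts.length - j

-- pvRunEnd never moves j backwards (cited by pvScan's termination proof).
theorem pvRunEnd_ge (ts : List (String × String)) (tag : String) (j : Nat) :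
    j ≤ pvRunEnd ts tag j := by
  fun_induction pvRunEnd ts tag j with
  | case1 j h heq ih => omega
  | case2 j h heq => omega
  | case3 j h => omega

-- B's outer while loop: at run start i, read tag, find run end j, emit the slice, continue at j.
def pvScan (ts : List (String × String)) (out : List (String × List String)) (i : Nat) :
    List (String × List String) :=
  if h : i < ts.length then
    let tag := (ts.get ⟨i, h⟩).2
    let j := pvRunEnd ts tag (i + 1)
    let out' :=
      if tag ≠ "" ∧ tag ≠ "O" then
        PySem.Set.add out (tag, (PySem.List.slice ts (some (i : Int)) (some (j : Int))).map (·.1))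
      else out
    pvScan ts out' j
  else out
termination_by ts.length - i
decreasing_by have := pvRunEnd_ge ts (ts.get ⟨i, h⟩).2 (i + 1); omega

def set_of_named_entities_alt (tagged_sentences : List (List (String × String))) :
    List (String × List String) :=
  tagged_sentences.foldl (fun out ts => pvScan ts out 0) PySem.Set.empty

-- ===== PRECONDITION & SPEC =====
def Spec_set_of_named_entities (tagged_sentences : List (List (String × String))) (out : List (String × List String)) : Prop := out = set_of_named_entities_alt tagged_sentences
instance (tagged_sentences : List (List (String × String))) (out : List (String × List String)) : Decidable (Spec_set_of_named_entities tagged_sentences out) := by unfold Spec_set_of_named_entities; infer_instance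

-- ===== CLAIM (what is proved, stated in full; the proofs are below) =====
def Claim_equal_set_of_named_entities : Prop := ∀ (tagged_sentences : List (List (String × String))), Dom_set_of_named_entities tagged_sentences → Spec_set_of_named_entities tagged_sentences (set_of_named_entities tagged_sentences)

-- ===== LEMMAS AND PROOFS =====

-- canonical consecutive-tag runs of a sentence (proof-only middle ground between A and B)
def pvGroupStep (groups : List (String × List String)) (p : String × String) :
    List (String × List String) :=
  match groups.getLast? with
  | some g => if g.1 = p.2 then groups.dropLast ++ [(g.1, g.2 ++ [p.1])]
              else groups ++ [(p.2, [p.1])]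
  | none => groups ++ [(p.2, [p.1])]

def pvGroups (ts : List (String × String)) : List (String × List String) :=
  ts.foldl pvGroupStep []

-- the runs A ever emits: nonempty tag and not 'O'
def pvEmit (g : List (String × List String)) : List (String × List String) :=
  g.filter (fun x => x.1 ≠ "" ∧ x.1 ≠ "O")

-- A's state, reconstructed from the group list for the same token prefix
def pvAbs (E : List (String × List String)) (g : List (String × List String)) :
    List (String × List String) × List String × Option String :=
  match g.getLast? with
  | none => (E, [], none)
  | some (t, toks) =>
      if t = "O" then (E ++ pvEmit g.dropLast, [], none)
      else (E ++ pvEmit g.dropLast, toks, some t)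

theorem pvStep_abs (E : List (String × List String)) (g : List (String × List String))
    (p : String × String) : pvStepTok (pvAbs E g) p = pvAbs E (pvGroupStep g p) := by
  rcases List.eq_nil_or_concat g with rfl | ⟨gs, ⟨t, toks⟩, rfl⟩
  · by_cases hO : p.2 = "O" <;>
      simp [pvAbs, pvGroupStep, pvStepTok, pvEmit, hO]
  · by_cases htO : t = "O" <;> by_cases htag : t = p.2 <;>
      by_cases hO : p.2 = "O" <;> by_cases hte : t = "" <;>
      simp_all [pvAbs, pvGroupStep, pvStepTok, pvEmit, List.filter_append]

theorem pvFold_abs (ts : List (String × String)) (E g : List (String × List String)) :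
    ts.foldl pvStepTok (pvAbs E g) = pvAbs E (ts.foldl pvGroupStep g) := by
  induction ts generalizing g with
  | nil => rfl
  | cons p ts ih => simp [List.foldl_cons, pvStep_abs, ih]

theorem pvSentA_eq (E : List (String × List String)) (ts : List (String × String)) :
    pvSentA E ts = E ++ pvEmit (pvGroups ts) := by
  have h0 : (E, ([] : List String), (none : Option String)) = pvAbs E [] := rfl
  have h := pvFold_abs ts E []
  unfold pvSentA pvGroups
  rw [h0, h]
  rcases List.eq_nil_or_concat (ts.foldl pvGroupStep []) with he | ⟨gs, ⟨t, toks⟩, he⟩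
  · simp [he, pvAbs, pvEmit]
  · by_cases htO : t = "O" <;> by_cases hte : t = "" <;>
      simp_all [pvAbs, pvEmit, List.filter_append]

-- pvGroupStep never returns [] and factors over a nonempty tail of the accumulator
theorem pvGroupStep_ne_nil (g : List (String × List String)) (p : String × String) :
    pvGroupStep g p ≠ [] := by
  unfold pvGroupStep
  rcases hg : g.getLast? with _ | q
  · simp
  · rcases q with ⟨t, toks⟩; by_cases h : t = p.2 <;> simp [h]

theorem pvGroupStep_append (gs hs : List (String × List String)) (p : String × String)
    (hne : hs ≠ []) : pvGroupStep (gs ++ hs) p = gs ++ pvGroupStep hs p := by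
  unfold pvGroupStep
  rw [List.getLast?_append_of_ne_nil (l₁ := gs) hne]
  rcases hg : hs.getLast? with _ | q
  · simp [List.getLast?_eq_none_iff] at hg; exact absurd hg hne
  · rcases q with ⟨t, toks⟩
    by_cases h : t = p.2 <;>
      simp [h, List.dropLast_append_of_ne_nil (l' := gs) hne]

theorem pvFoldGroup_append (l : List (String × String)) (gs hs : List (String × List String))
    (hne : hs ≠ []) :
    l.foldl pvGroupStep (gs ++ hs) = gs ++ l.foldl pvGroupStep hs := by
  induction l generalizing hs with
  | nil => rfl
  | cons p l ih =>
      simp only [List.foldl_cons, pvGroupStep_append gs hs p hne]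
      exact ih _ (pvGroupStep_ne_nil hs p)

-- accumulating a run: fold from a single open group
theorem pvFoldGroup_run (l : List (String × String)) (t : String) (toks : List String) :
    l.foldl pvGroupStep [(t, toks)]
      = (t, toks ++ (l.takeWhile (fun p => p.2 = t)).map (·.1))
          :: pvGroups (l.dropWhile (fun p => p.2 = t)) := by
  induction l generalizing toks with
  | nil => simp [pvGroups]
  | cons q l ih =>
      by_cases h : q.2 = t
      · have hstep : pvGroupStep [(t, toks)] q = [(t, toks ++ [q.1])] := by
          simp [pvGroupStep, h]
        simp [List.foldl_cons, hstep, ih, h]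
      · have hstep : pvGroupStep [(t, toks)] q = [(t, toks)] ++ [(q.2, [q.1])] := by
          simp [pvGroupStep]; intro he; exact absurd he.symm h
        simp only [List.foldl_cons, hstep,
          pvFoldGroup_append l [(t, toks)] [(q.2, [q.1])] (by simp)]
        have : pvGroups (q :: l) = l.foldl pvGroupStep [(q.2, [q.1])] := by
          simp [pvGroups, pvGroupStep]
        simp [h, this]

-- span characterization of pvGroups
theorem pvGroups_cons (p : String × String) (l : List (String × String)) :
    pvGroups (p :: l)
      = (p.2, p.1 :: (l.takeWhile (fun q => q.2 = p.2)).map (·.1))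
          :: pvGroups (l.dropWhile (fun q => q.2 = p.2)) := by
  have h0 : pvGroups (p :: l) = l.foldl pvGroupStep [(p.2, [p.1])] := by
    simp [pvGroups, pvGroupStep]
  rw [h0, pvFoldGroup_run]; simp

-- take / drop through takeWhile length
theorem pvTake_tw (p : String × String → Bool) (l : List (String × String)) :
    l.take (l.takeWhile p).length = l.takeWhile p := by
  induction l with
  | nil => rfl
  | cons a l ih => by_cases h : p a <;> simp [h, ih]

theorem pvDrop_tw (p : String × String → Bool) (l : List (String × String)) :
    l.drop (l.takeWhile p).length = l.dropWhile p := by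
  induction l with
  | nil => rfl
  | cons a l ih => by_cases h : p a <;> simp [h, ih]

-- pvRunEnd computes j + length of the matching prefix of ts.drop j
theorem pvRunEnd_eq (ts : List (String × String)) (tag : String) (j : Nat) :
    pvRunEnd ts tag j = j + ((ts.drop j).takeWhile (fun p => p.2 = tag)).length := by
  fun_induction pvRunEnd ts tag j with
  | case1 j h heq ih =>
      rw [List.drop_eq_getElem_cons h]
      simp only [List.takeWhile_cons, List.get_eq_getElem] at *
      simp [heq, ih]; omega
  | case2 j h heq =>
      rw [List.drop_eq_getElem_cons h]
      simp only [List.takeWhile_cons, List.get_eq_getElem] at *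
      simp [heq]
  | case3 j h =>
      have : ts.drop j = [] := List.drop_eq_nil_of_le (by omega)
      simp [this]

-- B's scan from i equals the filter-fold over the runs of the suffix ts.drop i
theorem pvScan_eq (ts : List (String × String)) (out : List (String × List String)) (i : Nat) :
    pvScan ts out i
      = (pvEmit (pvGroups (ts.drop i))).foldl PySem.Set.add out := by
  fun_induction pvScan ts out i with
  | case1 out i h tag j out' ih =>
      have hdrop : ts.drop i = ts[i] :: ts.drop (i + 1) := List.drop_eq_getElem_cons h
      have htag : tag = ts[i].2 := rfl
      have hj : j = (i + 1) + ((ts.drop (i + 1)).takeWhile (fun p => p.2 = tag)).length :=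
        pvRunEnd_eq ts tag (i + 1)
      have hslice : PySem.List.slice ts (some (i : Int)) (some (j : Int))
          = ts[i] :: (ts.drop (i + 1)).takeWhile (fun p => p.2 = tag) := by
        rw [PySem.List.slice_natCast, hdrop]
        have h1 : j - i = ((ts.drop (i + 1)).takeWhile (fun p => p.2 = tag)).length + 1 := by
          omega
        rw [h1, List.take_succ_cons, pvTake_tw]
      have hrest : ts.drop j = (ts.drop (i + 1)).dropWhile (fun p => p.2 = tag) := by
        have h2 : ts.drop j
            = (ts.drop (i + 1)).drop ((ts.drop (i + 1)).takeWhile (fun p => p.2 = tag)).length := by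
          have h3 : j = ((ts.drop (i + 1)).takeWhile (fun p => p.2 = tag)).length + (i + 1) := by
            omega
          rw [List.drop_drop, h3, Nat.add_comm]
        rw [h2, pvDrop_tw]
      rw [ih, hrest, hdrop, pvGroups_cons, ← htag]
      simp only [out']
      by_cases hguard : tag ≠ "" ∧ tag ≠ "O" <;>
        simp [pvEmit, hguard, hslice]
  | case2 out i h =>
      have hnil : ts.drop i = [] := List.drop_eq_nil_of_le (by omega)
      simp [hnil, pvGroups, pvEmit]

-- A's whole fold against B's whole fold
theorem pvMain (tss : List (List (String × String))) (E : List (String × List String)) :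
    PySem.Set.ofList (tss.foldl pvSentA E)
      = tss.foldl (fun out ts => pvScan ts out 0) (PySem.Set.ofList E) := by
  induction tss generalizing E with
  | nil => rfl
  | cons ts tss ih =>
      simp only [List.foldl_cons, pvSentA_eq, ih, pvScan_eq, List.drop_zero]
      congr 1
      rw [PySem.Set.ofList_eq_foldl, PySem.Set.ofList_eq_foldl, List.foldl_append]

-- ===== VERDICT (by name: the statement is the Claim_ definition above) =====
theorem set_of_named_entities_spec : Claim_equal_set_of_named_entities := by
  intro tss _
  unfold Spec_set_of_named_entities set_of_named_entities set_of_named_entities_alt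
  rw [pvMain]
  rfl
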